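-- pv_equiv track=rewrite | github.com/qwertpas/auto_canny | vision_targetting_2019.py | getMinYPoint
-- ===== SOURCE A (Python) =====
-- def getMinYPoint(ar):
--     # returns point with minimum y coordinate in an array of points that are of the form [x,y]
--
--     minY = ar[0][1]
--     pos = 0
--
--     for i in range(0, len(ar)):
--
--         if (ar[i][1] < minY):
--             minY = ar[i][1]
--             pos = i
--
--     return ar[pos]
-- ===== SOURCE B (Python) =====
-- def getMinYPoint(ar):
--     # returns point with minimum y coordinate in an array of points of the form [x,y]:
--     # stably sort a copy by y and take the first element (stability keeps the
--     # earliest point among equal minimum y-values, like A's strict '<' loop).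
--     return sorted(ar, key=lambda p: p[1])[0]
-- ===== Notes on version B (the rewrite author's own statement) =====
-- stated objective: idiomatic
-- what changed: Replaced the explicit min-tracking index loop with a stable sort of the points by their y-coordinate followed by taking the first element; sort stability reproduces A's first-occurrence tie-breaking.
import Mathlib
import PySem

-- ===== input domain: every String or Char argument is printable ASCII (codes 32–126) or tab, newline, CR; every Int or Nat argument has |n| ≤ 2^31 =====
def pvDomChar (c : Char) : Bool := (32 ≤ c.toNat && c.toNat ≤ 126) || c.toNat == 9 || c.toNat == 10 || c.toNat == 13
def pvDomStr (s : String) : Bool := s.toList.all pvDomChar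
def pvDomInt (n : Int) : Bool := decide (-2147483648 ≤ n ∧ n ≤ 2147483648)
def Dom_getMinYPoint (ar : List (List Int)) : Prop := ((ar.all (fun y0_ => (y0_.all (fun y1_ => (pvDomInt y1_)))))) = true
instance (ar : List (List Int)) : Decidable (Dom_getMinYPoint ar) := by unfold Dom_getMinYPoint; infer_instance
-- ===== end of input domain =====

-- B replaces A's explicit min-tracking index loop by a stable sort on the y-coordinate
-- followed by taking the first element (idiomatic; same return value, first-occurrence ties).


-- ===== PORT A =====
def getMinYPoint (ar : List (List Int)) : List Int :=
  let minY : Int := (PySem.List.pyGet? ((PySem.List.pyGet? ar 0).getD []) 1).getD 0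
  let st : Int × Int :=
    (PySem.List.pyRange 0 (ar.length : Int)).foldl
      (fun (st : Int × Int) i =>
        if (PySem.List.pyGet? ((PySem.List.pyGet? ar i).getD []) 1).getD 0 < st.1 then
          ((PySem.List.pyGet? ((PySem.List.pyGet? ar i).getD []) 1).getD 0, i)
        else st)
      (minY, 0)
  (PySem.List.pyGet? ar st.2).getD []

-- ===== PORT B =====
def getMinYPoint_alt (ar : List (List Int)) : List Int :=
  (PySem.List.pyGet?
    (PySem.List.sorted ar (fun p => (PySem.List.pyGet? p 1).getD 0)) 0).getD []

-- ===== PRECONDITION & SPEC =====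
-- Pre_ excludes exactly the inputs on which the Python A raises IndexError:
-- the empty list (ar[0] fails) and lists containing a point with fewer than 2 entries (ar[i][1] fails).
def Pre_getMinYPoint (ar : List (List Int)) : Prop :=
  ar ≠ [] ∧ ∀ p ∈ ar, 2 ≤ p.length
instance (ar : List (List Int)) : Decidable (Pre_getMinYPoint ar) := by
  unfold Pre_getMinYPoint; infer_instance

def pvWitness_getMinYPoint : List (List Int) := [[3, 7], [1, -2], [5, -2]]

def Spec_getMinYPoint (ar : List (List Int)) (out : List Int) : Prop := out = getMinYPoint_alt ar
instance (ar : List (List Int)) (out : List Int) : Decidable (Spec_getMinYPoint ar out) := by unfold Spec_getMinYPoint; infer_instance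

-- ===== CLAIM (what is proved, stated in full; the proofs are below) =====
def Claim_equal_getMinYPoint : Prop := ∀ (ar : List (List Int)), Dom_getMinYPoint ar → Pre_getMinYPoint ar → Spec_getMinYPoint ar (getMinYPoint ar)

-- ===== LEMMAS AND PROOFS =====

-- the y-coordinate both programs compare (total form of p[1])
def pvY (p : List Int) : Int := (PySem.List.pyGet? p 1).getD 0

lemma pvPyGet?_zero {α : Type} (xs : List α) : PySem.List.pyGet? xs 0 = xs.head? := by
  cases xs <;> simp [PySem.List.pyGet?, PySem.List.pyIdx?]

lemma pvHead?_insertBy {α : Type} (before : α → α → Bool) (x : α) (ys : List α) :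
    (PySem.List.insertBy before x ys).head? =
      some (match ys with | [] => x | z :: _ => if before x z then x else z) := by
  cases ys with
  | nil => rfl
  | cons z zs => by_cases h : before x z = true <;> simp [PySem.List.insertBy, h]

lemma pvHead?_foldl_insertBy {α : Type} (before : α → α → Bool) :
    ∀ (xs acc : List α),
      ((xs.foldl (fun a x => PySem.List.insertBy before x a) acc).head?) =
      xs.foldl (fun (h : Option α) x =>
        match h with
        | none => some x
        | some z => if before x z then some x else some z) acc.head? := by
  intro xs
  induction xs with
  | nil => intro acc; rfl
  | cons x t ih =>
    intro acc
    simp only [List.foldl_cons]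
    rw [ih]
    congr 1
    cases acc with
    | nil => rfl
    | cons z zs =>
      rw [pvHead?_insertBy]
      by_cases h : before x z = true <;> simp [h]

lemma pvHead?_sorted_eq_min? (ar : List (List Int)) :
    (PySem.List.sorted ar pvY).head? = PySem.List.min? ar pvY := by
  rw [PySem.List.sorted_eq_foldl_insertBy, pvHead?_foldl_insertBy]
  unfold PySem.List.min?
  simp only [List.head?_nil, decide_eq_true_eq]
  rfl

-- one step of min? on an appended element
lemma pvMin?_append_singleton (l : List (List Int)) (x m : List Int)
    (h : PySem.List.min? l pvY = some m) :
    PySem.List.min? (l ++ [x]) pvY = if pvY x < pvY m then some x else some m := by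
  unfold PySem.List.min? at h ⊢
  rw [List.foldl_append, h]
  simp only [List.foldl_cons, List.foldl_nil]

-- the invariant of A's index loop: after scanning indices [0, n), the state is
-- (y of the running first minimum, an index holding it), and that minimum is min? of the prefix
lemma pvA_loop_inv (ar : List (List Int)) (e0 : List Int) (h0 : ar[0]? = some e0) :
    ∀ (n : Nat), n ≤ ar.length →
      ∃ (e : List Int) (k : Nat),
        PySem.List.min? (ar.take (max n 1)) pvY = some e ∧
        ((List.range n).foldl
          (fun (st : Int × Int) (i : Nat) =>
            if pvY (ar[i]?.getD []) < st.1 then (pvY (ar[i]?.getD []), (i : Int)) else st)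
          (pvY e0, 0)) = (pvY e, (k : Int)) ∧
        ar[k]? = some e := by
  intro n
  induction n with
  | zero =>
    intro _
    refine ⟨e0, 0, ?_, by simp, h0⟩
    cases ar with
    | nil => simp at h0
    | cons a t =>
      simp only [List.getElem?_cons_zero, Option.some.injEq] at h0
      subst h0
      simp [PySem.List.min?]
  | succ n ih =>
    intro hn
    obtain ⟨e, k, hmin, hfold, hk⟩ := ih (Nat.le_of_succ_le hn)
    have hlt : n < ar.length := hn
    have hxn : ar[n]? = some ar[n] := List.getElem?_eq_getElem hlt
    rw [List.range_succ, List.foldl_append, hfold]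
    simp only [List.foldl_cons, List.foldl_nil, hxn, Option.getD_some]
    cases n with
    | zero =>
      -- index 0 re-examines the initial candidate: the state does not change
      have he0 : ar[0] = e0 := by
        have h := List.getElem?_eq_getElem (by omega : 0 < ar.length)
        rw [h0] at h
        exact Option.some.inj h.symm
      have hpe : pvY e0 = pvY e := congrArg Prod.fst hfold
      rw [if_neg (by rw [he0]; show ¬ pvY e0 < (pvY e, (k : Int)).1; rw [hpe]; exact lt_irrefl _)]
      exact ⟨e, k, by simpa using hmin, rfl, hk⟩
    | succ m =>
      have htake : ar.take (m + 1 + 1) = ar.take (m + 1) ++ [ar[m + 1]] := by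
        rw [List.take_add_one, hxn]
        rfl
      have hmax : max (m + 1) 1 = m + 1 := by omega
      rw [hmax] at hmin
      by_cases h : pvY ar[m + 1] < pvY e
      · refine ⟨ar[m + 1], m + 1, ?_, by simp [h], hxn⟩
        have : max (m + 1 + 1) 1 = m + 1 + 1 := by omega
        rw [this, htake, pvMin?_append_singleton _ _ _ hmin]
        simp [h]
      · refine ⟨e, k, ?_, by simp [h], hk⟩
        have : max (m + 1 + 1) 1 = m + 1 + 1 := by omega
        rw [this, htake, pvMin?_append_singleton _ _ _ hmin]
        simp [h]

-- A computes the first element of minimal y, i.e. min? of the whole list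
lemma pvA_eq_min? (ar : List (List Int)) (hne : ar ≠ []) :
    ∃ e, PySem.List.min? ar pvY = some e ∧ getMinYPoint ar = e := by
  obtain ⟨a, t, rfl⟩ := List.exists_cons_of_ne_nil hne
  have h0 : (a :: t)[0]? = some a := rfl
  obtain ⟨e, k, hmin, hfold, hk⟩ := pvA_loop_inv (a :: t) a h0 (a :: t).length le_rfl
  have htake : (a :: t).take (max (a :: t).length 1) = a :: t := by
    rw [Nat.max_eq_left (by simp)]
    exact List.take_length
  rw [htake] at hmin
  refine ⟨e, hmin, ?_⟩
  simp only [getMinYPoint]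
  rw [PySem.List.pyRange_zero_natCast, List.foldl_map]
  simp only [PySem.List.pyGet?_natCast, pvPyGet?_zero]
  have hbody :
      ((List.range (a :: t).length).foldl
        (fun (st : Int × Int) (i : Nat) =>
          if (PySem.List.pyGet? (((a :: t)[i]?).getD []) 1).getD 0 < st.1 then
            ((PySem.List.pyGet? (((a :: t)[i]?).getD []) 1).getD 0, (i : Int))
          else st)
        ((PySem.List.pyGet? (((a :: t).head?).getD []) 1).getD 0, 0)) = (pvY e, (k : Int)) := by
    simpa [pvY] using hfold
  rw [hbody]
  rw [show ((k : Int)) = ((k : Nat) : Int) from rfl, PySem.List.pyGet?_natCast, hk]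
  rfl

-- B computes the head of the stable sort by y, i.e. the same min?
lemma pvB_eq_min? (ar : List (List Int)) (hne : ar ≠ []) :
    ∃ e, PySem.List.min? ar pvY = some e ∧ getMinYPoint_alt ar = e := by
  cases hm : PySem.List.min? ar pvY with
  | none => exact absurd ((PySem.List.min?_eq_none_iff ar pvY).mp hm) hne
  | some e =>
    refine ⟨e, rfl, ?_⟩
    unfold getMinYPoint_alt
    rw [pvPyGet?_zero]
    have : (PySem.List.sorted ar (fun p => (PySem.List.pyGet? p 1).getD 0)).head? = some e := by
      have h := pvHead?_sorted_eq_min? ar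
      rw [hm] at h
      simpa [pvY] using h
    rw [this]
    rfl

-- ===== VERDICT (by name: the statement is the Claim_ definition above) =====
theorem getMinYPoint_spec : Claim_equal_getMinYPoint := by
  intro ar _ hpre
  obtain ⟨ea, ha, hA⟩ := pvA_eq_min? ar hpre.1
  obtain ⟨eb, hb, hB⟩ := pvB_eq_min? ar hpre.1
  unfold Spec_getMinYPoint
  rw [hA, hB]
  rw [ha] at hb
  exact Option.some.inj hb
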